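-- pv_equiv track=rewrite | github.com/WillFrancois/AOC-2023 | day12/part1/day12part1.py | is_area_to_map
-- ===== SOURCE A (Python) =====
-- def is_area_to_map(spring_map_list, spring_area_element):
--     current_length_run = 0
--     length_run_list = []
--
--     for i in range(len(spring_area_element)):
--         if spring_area_element[i:][0] == "#":
--             current_length_run += 1
--         elif spring_area_element[i:][0] != "#" and current_length_run > 0:
--             length_run_list.append(current_length_run)
--             current_length_run = 0
--
--     if current_length_run > 0:
--         length_run_list.append(current_length_run)
--
--     if length_run_list == spring_map_list:
--         return True
--
--     return False
-- ===== SOURCE B (Python) =====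
-- def is_area_to_map(spring_map_list, spring_area_element):
--     # Replace every non-'#' character by a space, then let str.split() find the
--     # maximal '#'-runs; compare their lengths with the expected map.
--     normalized = ''.join(c if c == '#' else ' ' for c in spring_area_element)
--     return [len(run) for run in normalized.split()] == spring_map_list
-- ===== Notes on version B (the rewrite author's own statement) =====
-- stated objective: faster
-- what changed: The per-index scan that slices spring_area_element[i:] at every position and maintains a running counter with a trailing-flush branch is replaced by normalizing non-'#' characters to spaces and letting str.split() produce the maximal '#'-runs, whose lengths are compared to the list.
import Mathlib
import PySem

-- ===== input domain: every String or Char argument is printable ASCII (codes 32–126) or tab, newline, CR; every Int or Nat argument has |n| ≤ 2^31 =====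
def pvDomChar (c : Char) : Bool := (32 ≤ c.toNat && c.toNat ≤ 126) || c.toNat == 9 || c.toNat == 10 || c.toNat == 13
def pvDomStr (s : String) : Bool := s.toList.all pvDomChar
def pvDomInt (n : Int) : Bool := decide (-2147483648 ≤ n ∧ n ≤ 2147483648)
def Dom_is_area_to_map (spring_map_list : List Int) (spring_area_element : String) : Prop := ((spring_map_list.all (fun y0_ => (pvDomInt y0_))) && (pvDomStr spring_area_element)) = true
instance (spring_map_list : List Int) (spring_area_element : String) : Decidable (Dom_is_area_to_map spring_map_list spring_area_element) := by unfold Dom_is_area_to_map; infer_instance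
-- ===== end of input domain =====

-- ===== PORT A =====
-- B normalizes non-'#' chars to spaces and uses str.split() to find the '#'-runs, instead of
-- A's per-index scan that slices s[i:] each step (quadratic) with a counter and trailing flush.

-- A's loop: for i in range(len(s)): looks at s[i:][0] (= the i-th character),
-- counts a running '#'-run and flushes it on a non-'#' character.
def aLoop : List Char → Int → List Int → Int × List Int
  | [], cur, acc => (cur, acc)
  | c :: rest, cur, acc =>
    if c == '#' then aLoop rest (cur + 1) acc
    else if c != '#' && decide (cur > 0) then aLoop rest 0 (acc ++ [cur])
    else aLoop rest cur acc

def is_area_to_map (spring_map_list : List Int) (spring_area_element : String) : Bool :=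
  let p := aLoop spring_area_element.toList 0 []
  let lst := if p.1 > 0 then p.2 ++ [p.1] else p.2
  if lst = spring_map_list then true else false

-- ===== PORT B =====
def is_area_to_map_alt (spring_map_list : List Int) (spring_area_element : String) : Bool :=
  -- ''.join(c if c == '#' else ' ' for c in s): the joined string is this char list
  let normalized : List Char := spring_area_element.toList.map (fun c => if c == '#' then c else ' ')
  let runs : List Int := (PySem.Chars.split₀ normalized).map (fun run => (run.length : Int))
  decide (runs = spring_map_list)

-- ===== PRECONDITION & SPEC =====
def Spec_is_area_to_map (spring_map_list : List Int) (spring_area_element : String) (out : Bool) : Prop := out = is_area_to_map_alt spring_map_list spring_area_element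
instance (spring_map_list : List Int) (spring_area_element : String) (out : Bool) : Decidable (Spec_is_area_to_map spring_map_list spring_area_element out) := by unfold Spec_is_area_to_map; infer_instance

-- ===== CLAIM (what is proved, stated in full; the proofs are below) =====
def Claim_equal_is_area_to_map : Prop := ∀ (spring_map_list : List Int) (spring_area_element : String), Dom_is_area_to_map spring_map_list spring_area_element → Spec_is_area_to_map spring_map_list spring_area_element (is_area_to_map spring_map_list spring_area_element)

-- ===== LEMMAS AND PROOFS =====

-- pend k cs = the run lengths of ('#'*k ++ cs), the common spec of both ports
def pend : Int → List Char → List Int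
  | k, [] => if k > 0 then [k] else []
  | k, c :: rest => if c = '#' then pend (k + 1) rest
                    else if k > 0 then k :: pend 0 rest else pend 0 rest

theorem aLoop_pend : ∀ (cs : List Char) (k : Int) (acc : List Int), 0 ≤ k →
    (if (aLoop cs k acc).1 > 0 then (aLoop cs k acc).2 ++ [(aLoop cs k acc).1]
     else (aLoop cs k acc).2) = acc ++ pend k cs := by
  intro cs
  induction cs with
  | nil =>
    intro k acc hk
    simp only [aLoop, pend]
    split <;> simp
  | cons c rest ih =>
    intro k acc hk
    by_cases hc : c = '#'
    · simp only [aLoop, pend, hc, beq_self_eq_true, if_true]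
      rw [ih (k + 1) acc (by omega)]
    · by_cases hk0 : k > 0
      · simp only [aLoop, pend, if_neg hc, if_pos hk0]
        have hcb : (c == '#') = false := by simpa using hc
        simp only [hcb, Bool.false_eq_true, if_false, bne, Bool.not_false, Bool.true_and,
          decide_eq_true_eq, if_pos hk0]
        rw [ih 0 (acc ++ [k]) le_rfl]
        simp
      · have hk' : k = 0 := by omega
        subst hk'
        simp only [aLoop, pend, if_neg hc, if_neg hk0]
        have hcb : (c == '#') = false := by simpa using hc
        simp only [hcb, Bool.false_eq_true, if_false, decide_eq_true_eq,
          Bool.and_eq_true, if_neg hk0]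
        rw [if_neg (by simp : ¬((c != '#') = true ∧ (0:Int) > 0))]
        exact ih 0 acc le_rfl

theorem go_pend : ∀ (cs : List Char) (cur : List Char) (acc : List (List Char)),
    (PySem.Chars.split₀.go (cs.map (fun c => if c == '#' then c else ' ')) cur acc).map
        (fun run => (run.length : Int))
      = (acc.reverse.map (fun run => (run.length : Int))) ++ pend (cur.length : Int) cs := by
  intro cs
  induction cs with
  | nil =>
    intro cur acc
    simp only [List.map_nil, PySem.Chars.split₀.go, pend]
    by_cases h : cur.isEmpty
    · have : cur = [] := by simpa [List.isEmpty_iff] using h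
      subst this
      simp [h]
    · have hne : cur ≠ [] := by simpa [List.isEmpty_iff] using h
      have hpos : ((cur.length : Int) > 0) := by
        have := List.length_pos_of_ne_nil hne; exact_mod_cast this
      simp [h, hne]
  | cons c rest ih =>
    intro cur acc
    by_cases hc : c = '#'
    · have hsp : PySem.Chars.isspace '#' = false := by decide
      simp only [List.map_cons, hc, beq_self_eq_true, if_true, PySem.Chars.split₀.go, hsp,
        Bool.false_eq_true, if_false]
      rw [ih ('#' :: cur) acc]
      simp only [pend, List.length_cons]
      norm_num
    · have hcb : (c == '#') = false := by simpa using hc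
      have hsp : PySem.Chars.isspace ' ' = true := by decide
      simp only [List.map_cons, hcb, Bool.false_eq_true, if_false, PySem.Chars.split₀.go, hsp,
        if_true]
      by_cases h : cur.isEmpty
      · have hcur : cur = [] := by simpa [List.isEmpty_iff] using h
        subst hcur
        simp only [h, if_true]
        rw [ih [] acc]
        simp [pend, if_neg hc]
      · have hne : cur ≠ [] := by simpa [List.isEmpty_iff] using h
        have hpos : ((cur.length : Int) > 0) := by
          have := List.length_pos_of_ne_nil hne; exact_mod_cast this
        simp only [h, Bool.false_eq_true, if_false]
        rw [ih [] (cur.reverse :: acc)]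
        simp [pend, hne, if_neg hc]
-- ===== VERDICT (by name: the statement is the Claim_ definition above) =====
theorem is_area_to_map_spec : Claim_equal_is_area_to_map := by
  intro m s _
  unfold Spec_is_area_to_map is_area_to_map is_area_to_map_alt
  have hA := aLoop_pend s.toList 0 [] le_rfl
  have hB := go_pend s.toList [] []
  simp only [List.nil_append] at hA
  simp only [List.reverse_nil, List.map_nil, List.nil_append, List.length_nil, Nat.cast_zero] at hB
  simp only [PySem.Chars.split₀] at *
  simp only [hA, hB]
  split <;> simp_all
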